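-- pv_equiv track=rewrite | github.com/pybites/challenges | 02/rmachuca89/game.py | is_letters_in_draw
-- ===== SOURCE A (Python) =====
-- def is_letters_in_draw(word, draw):
--     """Validate letters in word are in draw"""
--     # All letters in draw must be uppercase
--     valid = True
--     draw = draw[:]
--     for letter in word.upper():
--         if letter not in draw:
--             valid = False
--             break
--         draw.remove(letter)
--     return valid
-- ===== SOURCE B (Python) =====
-- def is_letters_in_draw(word, draw):
--     """Validate letters in word are in draw"""
--     need = {}
--     for ch in word.upper():
--         need[ch] = need.get(ch, 0) + 1
--     have = {}
--     for item in draw: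
--         have[item] = have.get(item, 0) + 1
--     return all(cnt <= have.get(ch, 0) for ch, cnt in need.items())
-- ===== Notes on version B (the rewrite author's own statement) =====
-- stated objective: idiomatic
-- what changed: Replaces A's per-letter scan-and-remove loop over a mutated copy of draw with two frequency tables built in one pass each and a single multiset-containment comparison.
import Mathlib
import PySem

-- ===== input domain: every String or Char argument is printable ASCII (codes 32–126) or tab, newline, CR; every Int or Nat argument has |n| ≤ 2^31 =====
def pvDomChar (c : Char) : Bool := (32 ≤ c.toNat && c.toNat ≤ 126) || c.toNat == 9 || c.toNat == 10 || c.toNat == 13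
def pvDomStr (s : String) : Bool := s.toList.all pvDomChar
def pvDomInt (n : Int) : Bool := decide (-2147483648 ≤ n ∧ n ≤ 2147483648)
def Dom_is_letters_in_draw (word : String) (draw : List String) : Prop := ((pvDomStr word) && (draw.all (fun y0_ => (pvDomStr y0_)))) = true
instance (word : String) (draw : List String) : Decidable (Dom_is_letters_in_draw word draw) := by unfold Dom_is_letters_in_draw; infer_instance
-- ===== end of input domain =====

-- B replaces A's per-letter scan-and-remove loop over a copied draw list with two frequency
-- tables and a single multiset-containment check (idiomatic; equivalence is about the return
-- value — A only mutates a local copy of draw, so no caller-visible side effect differs).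


-- ===== PORT A =====
-- A's for-loop over word.upper(), carrying the mutated copy of draw; Python's iteration over a
-- string yields one-character strings (String.ofList [c]); list.remove of an element whose
-- membership was just checked removes the first occurrence = List.erase
-- (PySem.List.remove?_eq_some_erase) — exact here because the not-in branch breaks first.
def pvDrawLoop : List Char → List String → Bool
  | [], _ => true
  | c :: rest, d =>
    if (String.ofList [c]) ∉ d then
      false
    else
      pvDrawLoop rest (d.erase (String.ofList [c]))

def is_letters_in_draw (word : String) (draw : List String) : Bool :=
  pvDrawLoop (PySem.Chars.upper word.toList) draw

-- ===== PORT B =====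
-- Source B: two dict.get-counting loops, then all(cnt <= have.get(ch, 0) for ch, cnt in need.items())
def is_letters_in_draw_alt (word : String) (draw : List String) : Bool :=
  let need := ((PySem.Chars.upper word.toList).map (fun c => String.ofList [c])).foldl
      (fun d x => d.insert x (d.getD x 0 + 1)) (PySem.Dict.empty : PySem.Dict String Int)
  let haveD := draw.foldl
      (fun d x => d.insert x (d.getD x 0 + 1)) (PySem.Dict.empty : PySem.Dict String Int)
  need.items.all (fun p => decide (p.2 ≤ haveD.getD p.1 0))

-- ===== PRECONDITION & SPEC =====
def Spec_is_letters_in_draw (word : String) (draw : List String) (out : Bool) : Prop := out = is_letters_in_draw_alt word draw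
instance (word : String) (draw : List String) (out : Bool) : Decidable (Spec_is_letters_in_draw word draw out) := by unfold Spec_is_letters_in_draw; infer_instance

-- ===== CLAIM (what is proved, stated in full; the proofs are below) =====
def Claim_equal_is_letters_in_draw : Prop := ∀ (word : String) (draw : List String), Dom_is_letters_in_draw word draw → Spec_is_letters_in_draw word draw (is_letters_in_draw word draw)

-- ===== LEMMAS AND PROOFS =====

-- A's loop succeeds iff the multiset of uppercased letters is contained in the draw multiset
theorem pvDrawLoop_iff (cs : List Char) (d : List String) :
    pvDrawLoop cs d = true ↔
      ∀ s : String, (cs.map (fun c => String.ofList [c])).count s ≤ d.count s := by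
  induction cs generalizing d with
  | nil => simp [pvDrawLoop]
  | cons c rest ih =>
    by_cases hmem : (String.ofList [c]) ∈ d
    · rw [pvDrawLoop, if_neg (by simpa using hmem), ih]
      have hpos : 0 < d.count (String.ofList [c]) := List.count_pos_iff.mpr hmem
      constructor
      · intro h s
        by_cases hs : s = String.ofList [c]
        · subst hs
          have := h (String.ofList [c])
          rw [List.count_erase_self] at this
          simp only [List.map_cons, List.count_cons_self]
          omega
        · have := h s
          rw [List.count_erase_of_ne hs] at this
          rw [List.map_cons, List.count_cons_of_ne (Ne.symm hs)]
          exact this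
      · intro h s
        by_cases hs : s = String.ofList [c]
        · subst hs
          have := h (String.ofList [c])
          rw [List.count_erase_self]
          simp only [List.map_cons, List.count_cons_self] at this
          omega
        · have := h s
          rw [List.map_cons, List.count_cons_of_ne (Ne.symm hs)] at this
          rw [List.count_erase_of_ne hs]
          exact this
    · rw [pvDrawLoop, if_pos (by simpa using hmem)]
      refine iff_of_false (by simp) ?_
      intro h
      have := h (String.ofList [c])
      rw [List.count_eq_zero_of_not_mem hmem] at this
      simp only [List.map_cons, List.count_cons_self] at this
      omega

-- B computes exactly that multiset-containment condition
theorem pvAlt_iff (word : String) (draw : List String) :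
    is_letters_in_draw_alt word draw = true ↔
      ∀ s : String, ((PySem.Chars.upper word.toList).map (fun c => String.ofList [c])).count s ≤ draw.count s := by
  unfold is_letters_in_draw_alt
  simp only [PySem.Dict.foldl_insert_getD_add_one_eq_counter, PySem.Dict.items_counter,
    PySem.Dict.getD_counter, List.all_eq_true, List.mem_map]
  constructor
  · intro h s
    by_cases hs : s ∈ (PySem.Chars.upper word.toList).map (fun c => String.ofList [c])
    · have := h (s, (((PySem.Chars.upper word.toList).map (fun c => String.ofList [c])).count s : Int))
        ⟨s, by simpa [PySem.Set.mem_ofList] using hs, rfl⟩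
      simp at this
      exact_mod_cast this
    · rw [List.count_eq_zero_of_not_mem hs]
      omega
  · intro h p hp
    obtain ⟨k, hk, rfl⟩ := hp
    have := h k
    simp
    exact_mod_cast this

-- ===== VERDICT (by name: the statement is the Claim_ definition above) =====
theorem is_letters_in_draw_spec : Claim_equal_is_letters_in_draw := by
  intro word draw _
  unfold Spec_is_letters_in_draw
  rw [Bool.eq_iff_iff, is_letters_in_draw, pvDrawLoop_iff, pvAlt_iff]
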